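-- pv_equiv track=rewrite | github.com/Taltol123/MyProjects | Intro to Computer Science Python/Ex5/wordsearch.py | get_matrix_d_words
-- ===== SOURCE A (Python) =====
-- def get_matrix_d_words(matrix):
--     """
--     This function gets matrix.
--     Return all the matrix's words in down direction.
--     """
--     words = []
--     matrix_lines_size = len(matrix)
--     if matrix_lines_size != 0:
--         matrix_columns_size = len(matrix[0])
--         for column_index in range(matrix_columns_size):
--             word = ""
--             for line_index in range(matrix_lines_size):
--                 word += matrix[line_index][column_index]
--             words.append(word)
--     return words
-- ===== SOURCE B (Python) =====
-- def get_matrix_d_words(matrix):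
--     if not matrix:
--         return []
--     partial = [""] * len(matrix[0])
--     for row in matrix:
--         partial = [w + c for w, c in zip(partial, row)]
--     return partial
-- ===== Notes on version B (the rewrite author's own statement) =====
-- stated objective: alternative
-- what changed: Instead of A's column-major double-index loops building each word one column at a time, B makes a single row-major pass that maintains one partial word per column and extends all of them simultaneously as each row is consumed.
import Mathlib
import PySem

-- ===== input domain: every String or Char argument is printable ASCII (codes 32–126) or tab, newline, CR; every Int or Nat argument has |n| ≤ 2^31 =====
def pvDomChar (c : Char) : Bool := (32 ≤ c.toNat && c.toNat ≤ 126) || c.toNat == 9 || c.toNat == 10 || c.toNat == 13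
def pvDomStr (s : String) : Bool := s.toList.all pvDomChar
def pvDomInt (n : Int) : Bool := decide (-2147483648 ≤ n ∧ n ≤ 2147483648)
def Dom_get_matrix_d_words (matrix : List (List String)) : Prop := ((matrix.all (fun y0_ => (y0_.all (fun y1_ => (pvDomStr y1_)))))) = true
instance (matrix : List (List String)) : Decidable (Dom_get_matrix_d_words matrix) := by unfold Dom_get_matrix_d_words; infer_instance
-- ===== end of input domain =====

-- B replaces A's column-major double-index loops by a single row-major pass that
-- maintains one partial word per column and extends them all at once per row (alternative; same cost).

-- ===== PORT A =====
-- literal port: the indices produced by `range` are nonnegative and (under Pre_) in range,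
-- so the `getD` defaults are never returned on admitted inputs
def get_matrix_d_words (matrix : List (List String)) : List String :=
  let words : List String := []
  if matrix.length ≠ 0 then
    let matrix_columns_size := (matrix.headD []).length
    (List.range matrix_columns_size).foldl
      (fun words column_index =>
        words ++ [(List.range matrix.length).foldl
          (fun word line_index => word ++ ((matrix.getD line_index []).getD column_index "")) ""])
      words
  else words

-- ===== PORT B =====
-- port of Source B: one left fold over the rows; zip truncates exactly like Python's zip
def get_matrix_d_words_alt (matrix : List (List String)) : List String :=
  match matrix with
  | [] => []
  | r :: _ =>
      matrix.foldl
        (fun partial_ row => (partial_.zip row).map (fun p => p.1 ++ p.2))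
        (List.replicate r.length "")

-- ===== PRECONDITION & SPEC =====
-- Pre_ is exactly A's non-crash domain: every row at least as long as the first row
-- (otherwise A's inner indexing raises IndexError)
def Pre_get_matrix_d_words (matrix : List (List String)) : Prop :=
  ∀ row ∈ matrix, (matrix.headD []).length ≤ row.length
instance (matrix : List (List String)) : Decidable (Pre_get_matrix_d_words matrix) := by
  unfold Pre_get_matrix_d_words; infer_instance

def pvWitness_get_matrix_d_words : List (List String) := [["a","b"],["c","d"]]

def Spec_get_matrix_d_words (matrix : List (List String)) (out : List String) : Prop :=
  out = get_matrix_d_words_alt matrix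
instance (matrix : List (List String)) (out : List String) : Decidable (Spec_get_matrix_d_words matrix out) := by
  unfold Spec_get_matrix_d_words; infer_instance

-- ===== CLAIM =====
def Claim_equal_get_matrix_d_words : Prop :=
  ∀ (matrix : List (List String)), Dom_get_matrix_d_words matrix →
    Pre_get_matrix_d_words matrix →
    Spec_get_matrix_d_words matrix (get_matrix_d_words matrix)

-- ===== LEMMAS AND PROOFS =====

theorem pv_foldl_append_singleton {α β : Type} (g : α → β) :
    ∀ (l : List α) (acc : List β),
      l.foldl (fun ws x => ws ++ [g x]) acc = acc ++ l.map g := by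
  intro l
  induction l with
  | nil => intro acc; simp
  | cons a t ih => intro acc; simp [List.foldl, ih]

theorem pv_foldl_app :
    ∀ (l : List String) (acc : String),
      l.foldl (fun r s => r ++ s) acc = acc ++ l.foldl (fun r s => r ++ s) "" := by
  intro l
  induction l with
  | nil => intro acc; simp
  | cons a t ih =>
      intro acc
      simp only [List.foldl]
      rw [ih (acc ++ a), ih ("" ++ a), String.append_assoc]
      simp

theorem pv_join_cons (a : String) (l : List String) :
    String.join (a :: l) = a ++ String.join l := by
  simp only [String.join, List.foldl]
  rw [pv_foldl_app l ("" ++ a)]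
  simp

theorem pv_foldl_str_hom {α : Type} (h : α → String) :
    ∀ (l : List α) (acc : String),
      l.foldl (fun w x => w ++ h x) acc = acc ++ String.join (l.map h) := by
  intro l
  induction l with
  | nil => intro acc; simp [String.join]
  | cons a t ih =>
      intro acc
      simp only [List.foldl, List.map, pv_join_cons]
      rw [ih (acc ++ h a), String.append_assoc]

theorem pv_range_map_getD {α β : Type} (g : α → β) (d : α) :
    ∀ (l : List α),
      (List.range l.length).map (fun i => g (l.getD i d)) = l.map g := by
  intro l
  induction l with
  | nil => simp
  | cons a t ih =>
      simp only [List.length_cons, List.range_succ_eq_map, List.map_cons, List.map_map]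
      refine congrArg₂ _ (by simp) ?_
      simpa using ih

theorem pv_step_getD :
    ∀ (acc row : List String) (i : Nat), i < acc.length → i < row.length →
      ((acc.zip row).map (fun p => p.1 ++ p.2)).getD i "" =
        acc.getD i "" ++ row.getD i "" := by
  intro acc
  induction acc with
  | nil => intro row i h1 _; simp at h1
  | cons a t ih =>
      intro row i h1 h2
      cases row with
      | nil => simp at h2
      | cons b u =>
          cases i with
          | zero => simp
          | succ j =>
              simp only [List.zip_cons_cons, List.map_cons, List.getD_cons_succ]
              exact ih u j (by simpa using h1) (by simpa using h2)

theorem pv_step_length (acc row : List String) (h : acc.length ≤ row.length) :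
    ((acc.zip row).map (fun p => p.1 ++ p.2)).length = acc.length := by
  simp [Nat.min_eq_left h]

theorem pv_fold_rows :
    ∀ (rows : List (List String)) (acc : List String),
      (∀ row ∈ rows, acc.length ≤ row.length) →
      rows.foldl (fun partial_ row => (partial_.zip row).map (fun p => p.1 ++ p.2)) acc =
        (List.range acc.length).map
          (fun i => acc.getD i "" ++ String.join (rows.map (fun row => row.getD i ""))) := by
  intro rows
  induction rows with
  | nil =>
      intro acc _
      simp only [List.foldl, List.map_nil]
      have h := pv_range_map_getD (fun s => s) ("" : String) acc
      simp only [List.map_id'] at h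
      simpa [String.join, List.getD_eq_getElem?_getD] using h.symm
  | cons a t ih =>
      intro acc h
      have ha : acc.length ≤ a.length := h a (by simp)
      have hlen := pv_step_length acc a ha
      simp only [List.foldl]
      rw [ih _ (by intro row hm; rw [hlen]; exact h row (by simp [hm])), hlen]
      refine List.map_congr_left ?_
      intro i hi
      have hi' : i < acc.length := List.mem_range.mp hi
      rw [pv_step_getD acc a i hi' (Nat.lt_of_lt_of_le hi' ha)]
      simp only [List.map_cons, pv_join_cons, String.append_assoc]

theorem pv_A_closed (r : List String) (rs : List (List String)) :
    get_matrix_d_words (r :: rs) =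
      (List.range r.length).map
        (fun i => String.join ((r :: rs).map (fun row => row.getD i ""))) := by
  unfold get_matrix_d_words
  simp only [List.length_cons, ne_eq, Nat.succ_ne_zero, not_false_eq_true, if_pos,
    List.headD_cons]
  rw [pv_foldl_append_singleton]
  simp only [List.nil_append]
  refine List.map_congr_left ?_
  intro ci _
  rw [pv_foldl_str_hom (fun li => (((r :: rs).getD li []).getD ci "")) _ ""]
  have h3 := pv_range_map_getD (fun row => row.getD ci "") ([] : List String) (r :: rs)
  simp only [List.length_cons] at h3
  rw [h3]
  simp

-- ===== VERDICT =====
theorem get_matrix_d_words_spec : Claim_equal_get_matrix_d_words := by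
  intro matrix _hdom hpre
  unfold Spec_get_matrix_d_words
  cases matrix with
  | nil => rfl
  | cons r rs =>
      have hpre' : ∀ row ∈ r :: rs, r.length ≤ row.length := by
        intro row hm; simpa using hpre row hm
      have hB : get_matrix_d_words_alt (r :: rs) =
          (r :: rs).foldl (fun partial_ row => (partial_.zip row).map (fun p => p.1 ++ p.2))
            (List.replicate r.length "") := rfl
      rw [pv_A_closed r rs, hB]
      rw [pv_fold_rows (r :: rs) (List.replicate r.length "")
            (by intro row hm; simpa using hpre' row hm)]
      simp only [List.length_replicate]
      refine List.map_congr_left ?_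
      intro i hi
      have : (List.replicate r.length "").getD i "" = "" := by
        simp [List.getD]
      rw [this]
      simp
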